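-- pv_equiv track=rewrite | github.com/lani1n/Kiangkrit45 | learning/python/pirple/project/01-project.py | four_in_column
-- ===== SOURCE A (Python) =====
-- def four_in_column(column_matrix):
--     winner = False
--     for column in column_matrix:
--         counter = 0
--         length = len(column)
--         for i in range(1, length):
--             if column[i - 1] != " " and column[i] != " " and column[i -1 ] == column[i]:
--                  counter += 1
--             else:
--                 counter = 0
--             if counter == 3:
--                 winner = column[i - 1]
--                 return winner
--     return winner
-- ===== SOURCE B (Python) =====
-- def _run_length(head, xs):
--     """Length of the prefix of xs whose elements equal head."""
--     n = 0
--     for x in xs: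
--         if x != head:
--             break
--         n += 1
--     return n
--
--
-- def four_in_column(column_matrix):
--     # Run-extraction scan: split each column into maximal runs of equal
--     # tokens and return the first non-space token whose run is >= 4 long.
--     for column in column_matrix:
--         rest = column
--         while rest:
--             head = rest[0]
--             run = _run_length(head, rest[1:])
--             if head != " " and run + 1 >= 4:
--                 return head
--             rest = rest[run + 1:]
--     return False
-- ===== Notes on version B (the rewrite author's own statement) =====
-- stated objective: alternative
-- what changed: B splits each column into maximal runs of equal tokens (run-length extraction with a two-phase scan and slicing past each run) and returns the first non-space token whose run is at least 4 long, instead of A's incremental adjacent-pair counter with resets.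
import Mathlib
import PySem

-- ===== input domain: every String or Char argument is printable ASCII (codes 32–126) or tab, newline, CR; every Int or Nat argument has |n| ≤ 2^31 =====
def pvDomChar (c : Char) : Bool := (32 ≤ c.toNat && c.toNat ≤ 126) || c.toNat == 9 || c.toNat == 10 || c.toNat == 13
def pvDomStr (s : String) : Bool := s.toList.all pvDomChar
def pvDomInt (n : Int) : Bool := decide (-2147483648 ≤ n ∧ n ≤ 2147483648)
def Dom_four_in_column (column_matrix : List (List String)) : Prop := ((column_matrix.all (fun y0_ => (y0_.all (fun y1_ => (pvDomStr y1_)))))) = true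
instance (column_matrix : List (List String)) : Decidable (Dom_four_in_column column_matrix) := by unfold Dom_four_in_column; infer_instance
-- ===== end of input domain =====

-- B replaces A's incremental same-pair counter with a run-extraction scan
-- (split each column into maximal runs of equal tokens, test run lengths);
-- objective: alternative algorithm, same cost. Python A returns the winning
-- token (a truthy string) or False; under the Bool convention both ports
-- return that value's truthiness.


-- ===== PORT A =====
-- inner loop 'for i in range(1, length)' of A, as the obvious index recursion;
-- early return is the 'some' result
def fourAInner (column : List String) (i : Nat) (counter : Nat) : Option String :=
  if _h : i < column.length then
    let prev := PySem.List.pyGetD column ((i : Int) - 1) ""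
    let cur := PySem.List.pyGetD column (i : Int) ""
    let counter' := if prev != " " && cur != " " && prev == cur then counter + 1 else 0
    if counter' == 3 then some prev else fourAInner column (i + 1) counter'
  else none
termination_by column.length - i

-- outer loop 'for column in column_matrix'
def fourAOuter : List (List String) → Option String
  | [] => none
  | column :: rest =>
    match fourAInner column 1 0 with
    | some w => some w
    | none => fourAOuter rest

def four_in_column (column_matrix : List (List String)) : Bool :=
  -- Python returns the token string (truthy) or False; as Bool: s ≠ ""
  match fourAOuter column_matrix with
  | some w => decide (w ≠ "")
  | none => false

-- ===== PORT B =====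
-- port of Source B's _run_length
def runLength (head : String) : List String → Nat
  | [] => 0
  | x :: xs => if x != head then 0 else runLength head xs + 1

-- port of Source B's inner 'while rest:' loop
def colAlt : List String → Option String
  | [] => none
  | head :: tl =>
    let run := runLength head tl
    if head != " " && 4 ≤ run + 1 then some head
    else colAlt (tl.drop run)
termination_by l => l.length
decreasing_by simp

-- outer 'for column in column_matrix' loop of Source B
def altOuter : List (List String) → Option String
  | [] => none
  | column :: rest =>
    match colAlt column with
    | some w => some w
    | none => altOuter rest

def four_in_column_alt (column_matrix : List (List String)) : Bool :=
  match altOuter column_matrix with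
  | some w => decide (w ≠ "")
  | none => false

-- ===== PRECONDITION & SPEC =====
def Spec_four_in_column (column_matrix : List (List String)) (out : Bool) : Prop := out = four_in_column_alt column_matrix
instance (column_matrix : List (List String)) (out : Bool) : Decidable (Spec_four_in_column column_matrix out) := by unfold Spec_four_in_column; infer_instance

-- ===== CLAIM (what is proved, stated in full; the proofs are below) =====
def Claim_equal_four_in_column : Prop := ∀ (column_matrix : List (List String)), Dom_four_in_column column_matrix → Spec_four_in_column column_matrix (four_in_column column_matrix)

-- ===== LEMMAS AND PROOFS =====

-- A's inner loop re-expressed as a structural recursion over adjacent pairs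
def pairLoop (prev : String) (rest : List String) (counter : Nat) : Option String :=
  match rest with
  | [] => none
  | cur :: tl =>
    let counter' := if prev != " " && cur != " " && prev == cur then counter + 1 else 0
    if counter' == 3 then some prev else pairLoop cur tl counter'

theorem fourAInner_eq_pairLoop :
    ∀ (rest : List String) (pre : List String) (prev : String) (counter : Nat),
    fourAInner (pre ++ prev :: rest) (pre.length + 1) counter = pairLoop prev rest counter := by
  intro rest
  induction rest with
  | nil =>
    intro pre prev counter
    rw [fourAInner]
    simp [pairLoop]
  | cons cur tl ih =>
    intro pre prev counter
    rw [fourAInner]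
    have hlen : pre.length + 1 < (pre ++ prev :: cur :: tl).length := by
      simp
    have hprev : PySem.List.pyGetD (pre ++ prev :: cur :: tl) (((pre.length + 1 : Nat) : Int) - 1) "" = prev := by
      have : (((pre.length + 1 : Nat) : Int) - 1) = ((pre.length : Nat) : Int) := by push_cast; ring
      rw [this, PySem.List.pyGetD_natCast]
      simp
    have hcur : PySem.List.pyGetD (pre ++ prev :: cur :: tl) ((pre.length + 1 : Nat) : Int) "" = cur := by
      rw [PySem.List.pyGetD_natCast]
      have : pre.length + 1 = (pre ++ [prev]).length := by simp
      rw [this]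
      have : pre ++ prev :: cur :: tl = (pre ++ [prev]) ++ cur :: tl := by simp
      rw [this, List.getD_eq_getElem?_getD, List.getElem?_append_right (by simp)]
      simp
    simp only [hlen, dif_pos, hprev, hcur]
    by_cases hc : (prev != " " && cur != " " && prev == cur) = true
    · simp only [hc, if_pos]
      by_cases h3 : counter + 1 = 3
      · simp [pairLoop, hc, h3]
      · have h3' : (counter + 1 == 3) = false := beq_eq_false_iff_ne.mpr h3
        simp only [h3', Bool.false_eq_true, if_false]
        have hre : pre ++ prev :: cur :: tl = (pre ++ [prev]) ++ cur :: tl := by simp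
        have hlen2 : pre.length + 1 + 1 = (pre ++ [prev]).length + 1 := by simp
        rw [hre, hlen2, ih]
        simp [pairLoop, hc, h3']
    · have hc' : (prev != " " && cur != " " && prev == cur) = false := by
        simpa using hc
      simp only [hc', Bool.false_eq_true, if_false]
      have hre : pre ++ prev :: cur :: tl = (pre ++ [prev]) ++ cur :: tl := by simp
      have hlen2 : pre.length + 1 + 1 = (pre ++ [prev]).length + 1 := by simp
      rw [hre, hlen2, ih]
      simp [pairLoop, hc']

-- pairLoop through a run of non-space tokens equal to head
theorem pairLoop_run (head : String) (hhead : (head != " ") = true) :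
    ∀ (tl : List String) (counter : Nat), counter ≤ 2 →
    pairLoop head tl counter =
      if 3 ≤ counter + runLength head tl then some head
      else match tl.drop (runLength head tl) with
           | [] => none
           | cur :: tl' => pairLoop cur tl' 0 := by
  intro tl
  induction tl with
  | nil => intro counter hc; simp [pairLoop, runLength]; omega
  | cons x xs ih =>
    intro counter hc
    by_cases hx : x = head
    · subst hx
      have hcond : (x != " " && x != " " && x == x) = true := by simp [hhead]
      rw [pairLoop]
      simp only [hcond, if_pos]
      by_cases h3 : counter + 1 = 3
      · have h3t : (counter + 1 == 3) = true := by simp [h3]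
        simp only [h3t, if_pos]
        rw [runLength]
        simp
        omega
      · have h3' : (counter + 1 == 3) = false := beq_eq_false_iff_ne.mpr h3
        simp only [h3', Bool.false_eq_true, if_false]
        rw [ih (counter + 1) (by omega)]
        rw [runLength]
        simp only [bne_self_eq_false, Bool.false_eq_true, if_false]
        have harith : 3 ≤ counter + 1 + runLength x xs ↔ 3 ≤ counter + (runLength x xs + 1) := by omega
        rw [if_congr harith rfl rfl]
        simp
    · have hx' : (x != head) = true := by simp [hx]
      have hcond : (head != " " && x != " " && head == x) = false := by
        simp; intro _ _; exact fun h => absurd h.symm hx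
      rw [pairLoop]
      simp only [hcond, Bool.false_eq_true, if_false]
      rw [runLength]
      simp only [hx', if_pos]
      simp
      omega

-- pairLoop through a run of spaces: counter never advances
theorem pairLoop_space :
    ∀ (tl : List String) (counter : Nat),
    pairLoop " " tl counter =
      match tl.drop (runLength " " tl) with
      | [] => none
      | cur :: tl' => pairLoop cur tl' 0 := by
  intro tl
  induction tl with
  | nil => intro counter; simp [pairLoop, runLength]
  | cons x xs ih =>
    intro counter
    have hcond : (" " != " " && x != " " && " " == x) = false := by simp
    rw [pairLoop]
    simp only [hcond, Bool.false_eq_true, if_false]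
    by_cases hx : x = " "
    · subst hx
      rw [ih 0, runLength]
      simp
    · rw [runLength]
      have hx' : (x != " ") = true := by simp [hx]
      simp [hx']

theorem drop_runLength_lt (head : String) (tl : List String) :
    (tl.drop (runLength head tl)).length ≤ tl.length := by
  simp

-- per-column equivalence: A's pair scan equals B's run scan
theorem pairLoop_eq_colAlt :
    ∀ (n : Nat) (head : String) (tl : List String), tl.length ≤ n →
    pairLoop head tl 0 = colAlt (head :: tl) := by
  intro n
  induction n with
  | zero =>
    intro head tl hlen
    have : tl = [] := List.eq_nil_of_length_eq_zero (Nat.le_zero.mp hlen)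
    subst this
    rw [colAlt]
    simp [pairLoop, runLength, colAlt]
  | succ n ih =>
    intro head tl hlen
    rw [colAlt]
    by_cases hh : head = " "
    · subst hh
      have : (" " != " " && 4 ≤ runLength " " tl + 1) = false := by simp
      simp only [this, Bool.false_eq_true, if_false]
      rw [pairLoop_space tl 0]
      cases hdrop : tl.drop (runLength " " tl) with
      | nil => simp [colAlt]
      | cons cur tl' =>
        have hlt : tl'.length ≤ n := by
          have h1 := drop_runLength_lt " " tl
          rw [hdrop] at h1
          simp at h1; omega
        exact ih cur tl' hlt
    · have hh' : (head != " ") = true := by simp [hh]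
      rw [pairLoop_run head hh' tl 0 (by omega)]
      by_cases h4 : 3 ≤ runLength head tl
      · have : (head != " " && 4 ≤ runLength head tl + 1) = true := by
          simp [hh]; omega
        simp only [this, if_pos]
        simp; omega
      · have hc : (head != " " && 4 ≤ runLength head tl + 1) = false := by
          simp; intro _; omega
        simp only [hc, Bool.false_eq_true, if_false]
        rw [if_neg (show ¬ 3 ≤ 0 + runLength head tl by omega)]
        cases hdrop : tl.drop (runLength head tl) with
        | nil => simp [colAlt]
        | cons cur tl' =>
          have hlt : tl'.length ≤ n := by
            have h1 := drop_runLength_lt head tl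
            rw [hdrop] at h1
            simp at h1; omega
          exact ih cur tl' hlt

theorem fourAInner_eq_colAlt (column : List String) :
    fourAInner column 1 0 = colAlt column := by
  cases column with
  | nil =>
    rw [fourAInner]
    simp [colAlt]
  | cons head tl =>
    have := fourAInner_eq_pairLoop tl [] head 0
    simp only [List.nil_append, List.length_nil, Nat.zero_add] at this
    rw [this]
    exact pairLoop_eq_colAlt tl.length head tl (le_refl _)

theorem outer_eq : ∀ (m : List (List String)), fourAOuter m = altOuter m := by
  intro m
  induction m with
  | nil => rfl
  | cons c rest ih =>
    rw [fourAOuter, altOuter, fourAInner_eq_colAlt, ih]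

-- ===== VERDICT (by name: the statement is the Claim_ definition above) =====
theorem four_in_column_spec : Claim_equal_four_in_column := by
  intro m _
  unfold Spec_four_in_column four_in_column four_in_column_alt
  rw [outer_eq]
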